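-- pv_equiv track=rewrite | github.com/int-y1/BBFractran | decider/lin_comb.py | lin_comb
-- ===== SOURCE A (Python) =====
-- from itertools import product
--
-- def lin_comb(prog,EXP_LIM):
--     maxidx=len(prog[0])
--     usable=[0]*maxidx
--     for tmp in prog:
--         use2=[i for i in range(maxidx) if tmp[i]<-1]
--         use1=[i for i in range(maxidx) if tmp[i]==-1]
--         if not use2 and len(use1)==1: usable[use1[0]]=1
--     if not usable[0]: return '?'
--
--     c0=[list(range(1,EXP_LIM+1))]
--     for i in range(1,maxidx):
--         if usable[i]: c0.append(list(range(-EXP_LIM,EXP_LIM+1)))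
--         else: c0.append(list(range(-EXP_LIM,1)))
--     for c in product(*c0):
--         # every inst should be >=0
--         for tmp in prog:
--             if sum(i*j for i,j in zip(c,tmp))<0: break
--         else:
--             return str(c)
--
--     return '?'
-- ===== SOURCE B (Python) =====
-- # B: pruned depth-first search over variables instead of exhaustive product enumeration.
-- def _maxcontrib(bounds, coeffs):
--     # max of sum(c*x) over x[i] in [lo_i, hi_i]
--     s = 0
--     for (lo, hi), c in zip(bounds, coeffs):
--         s += c * hi if c >= 0 else c * lo
--     return s
--
-- def _dfs(bounds, state):
--     # state: list of (partial dot-product, remaining coefficients) per constraint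
--     if any(p + _maxcontrib(bounds, cs) < 0 for p, cs in state):
--         return None
--     if not bounds:
--         return []
--     (lo, hi), rest = bounds[0], bounds[1:]
--     for v in range(lo, hi + 1):
--         sub = _dfs(rest, [(p + cs[0] * v, cs[1:]) for p, cs in state])
--         if sub is not None:
--             return [v] + sub
--     return None
--
-- def lin_comb(prog, EXP_LIM):
--     maxidx = len(prog[0])
--     usable = [0] * maxidx
--     for tmp in prog:
--         use2 = [i for i in range(maxidx) if tmp[i] < -1]
--         use1 = [i for i in range(maxidx) if tmp[i] == -1]
--         if not use2 and len(use1) == 1: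
--             usable[use1[0]] = 1
--     if not usable[0]:
--         return '?'
--     bounds = [(1, EXP_LIM)]
--     for i in range(1, maxidx):
--         bounds.append((-EXP_LIM, EXP_LIM) if usable[i] else (-EXP_LIM, 0))
--     state = [(0, row[:maxidx]) for row in prog]
--     res = _dfs(bounds, state)
--     return '?' if res is None else str(tuple(res))
-- ===== Notes on version B (the rewrite author's own statement) =====
-- stated objective: alternative
-- what changed: Replaces itertools.product exhaustive enumeration of all coefficient tuples with a recursive depth-first search over the variables in the same lexicographic order, maintaining per-constraint partial dot-products and pruning any branch whose partial sum plus the maximum achievable remaining contribution is already negative.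
import Mathlib
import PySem

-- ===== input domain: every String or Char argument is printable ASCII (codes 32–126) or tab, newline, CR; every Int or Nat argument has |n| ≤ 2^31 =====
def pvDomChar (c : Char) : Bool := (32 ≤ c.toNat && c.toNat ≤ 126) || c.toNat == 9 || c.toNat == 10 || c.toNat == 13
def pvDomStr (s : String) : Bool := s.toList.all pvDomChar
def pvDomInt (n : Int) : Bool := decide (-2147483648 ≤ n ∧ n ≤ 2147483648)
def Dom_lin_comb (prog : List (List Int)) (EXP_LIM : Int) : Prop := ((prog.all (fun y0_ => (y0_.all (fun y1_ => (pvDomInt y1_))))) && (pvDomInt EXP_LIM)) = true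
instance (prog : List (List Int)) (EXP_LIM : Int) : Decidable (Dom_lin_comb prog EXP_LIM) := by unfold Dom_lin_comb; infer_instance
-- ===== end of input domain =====

-- B replaces A's exhaustive itertools.product enumeration by a pruned depth-first search
-- over the variables (same lexicographic order, per-constraint partial sums with a sound
-- upper-bound prune); objective: alternative algorithm, identical return value.


-- ===== PORT A =====
-- The 'usable' computation is textually identical in A and B (Source B keeps it), so both
-- ports share this transliteration of it.  tmp[i] is ported as getD (exact under
-- Pre_lin_comb, which requires every row to have length ≥ maxidx; Python raises
-- IndexError otherwise).
def pvUsable (prog : List (List Int)) (maxidx : Nat) : List Int :=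
  prog.foldl (fun usable tmp =>
    let use2 := (List.range maxidx).filter (fun i => decide (tmp.getD i 0 < -1))
    let use1 := (List.range maxidx).filter (fun i => tmp.getD i 0 == -1)
    if use2 = [] ∧ use1.length = 1 then usable.set (use1.headD 0) 1 else usable)
    (List.replicate maxidx 0)

-- str(tuple(c)) for a tuple of ints; shared (both Pythons render the result the same way)
def pvTupleStr (c : List Int) : String :=
  "(" ++ PySem.Str.join ", " (c.map PySem.Int.toStr) ++ (if c.length = 1 then ",)" else ")")

-- sum(i*j for i,j in zip(c,tmp))
def pvDot (c tmp : List Int) : Int := (List.zipWith (fun i j => i * j) c tmp).sum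

-- itertools.product(*c0) in its order (leftmost factor varies slowest)
def pvCart : List (List Int) → List (List Int)
  | [] => [[]]
  | xs :: rest => xs.flatMap (fun x => (pvCart rest).map (fun s => x :: s))

def lin_comb (prog : List (List Int)) (EXP_LIM : Int) : String :=
  let maxidx := (prog.headD []).length    -- len(prog[0]); Pre_ gives prog ≠ []
  let usable := pvUsable prog maxidx
  if usable.getD 0 0 = 0 then "?"         -- usable[0]; Pre_ gives maxidx ≥ 1
  else
    let c0 : List (List Int) :=
      PySem.List.pyRange 1 (EXP_LIM + 1) 1 ::
        (List.range' 1 (maxidx - 1)).map (fun i =>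
          if usable.getD i 0 ≠ 0 then PySem.List.pyRange (-EXP_LIM) (EXP_LIM + 1) 1
          else PySem.List.pyRange (-EXP_LIM) 1 1)
    match (pvCart c0).find? (fun c => !prog.any (fun tmp => decide (pvDot c tmp < 0))) with
    | some c => pvTupleStr c
    | none => "?"

-- ===== PORT B =====
-- max of sum(c*x) over lo_i ≤ x_i ≤ hi_i (Source B's _maxcontrib)
def pvMaxContrib (bounds : List (Int × Int)) (cs : List Int) : Int :=
  ((bounds.zip cs).map (fun bc => if 0 ≤ bc.2 then bc.2 * bc.1.2 else bc.2 * bc.1.1)).sum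

-- Source B's _dfs; cs[0] is ported as headD (exact under Pre_lin_comb: rows have length ≥ maxidx)
def pvDfs (bounds : List (Int × Int)) (state : List (Int × List Int)) : Option (List Int) :=
  if state.any (fun pc => decide (pc.1 + pvMaxContrib bounds pc.2 < 0)) then none
  else
    match bounds with
    | [] => some []
    | (lo, hi) :: rest =>
      (PySem.List.pyRange lo (hi + 1) 1).findSome? (fun v =>
        (pvDfs rest (state.map (fun pc => (pc.1 + pc.2.headD 0 * v, pc.2.tail)))).map
          (fun s => v :: s))

def lin_comb_alt (prog : List (List Int)) (EXP_LIM : Int) : String :=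
  let maxidx := (prog.headD []).length
  let usable := pvUsable prog maxidx
  if usable.getD 0 0 = 0 then "?"
  else
    let bounds : List (Int × Int) :=
      (1, EXP_LIM) ::
        (List.range' 1 (maxidx - 1)).map (fun i =>
          if usable.getD i 0 ≠ 0 then (-EXP_LIM, EXP_LIM) else (-EXP_LIM, 0))
    let state := prog.map (fun row => ((0 : Int), row.take maxidx))
    match pvDfs bounds state with
    | some res => pvTupleStr res
    | none => "?"

-- ===== PRECONDITION & SPEC =====
-- Pre_ excludes exactly the inputs where Python A raises IndexError: empty prog
-- (prog[0]), maxidx = 0 (usable[0]) and rows shorter than maxidx (tmp[i]).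
def Pre_lin_comb (prog : List (List Int)) (EXP_LIM : Int) : Prop :=
  prog ≠ [] ∧ 1 ≤ (prog.headD []).length ∧ ∀ row ∈ prog, (prog.headD []).length ≤ row.length

instance (prog : List (List Int)) (EXP_LIM : Int) : Decidable (Pre_lin_comb prog EXP_LIM) := by
  unfold Pre_lin_comb; infer_instance

def pvWitness_lin_comb : List (List Int) × Int := ([[-1, 2]], 1)

def Spec_lin_comb (prog : List (List Int)) (EXP_LIM : Int) (out : String) : Prop := out = lin_comb_alt prog EXP_LIM
instance (prog : List (List Int)) (EXP_LIM : Int) (out : String) : Decidable (Spec_lin_comb prog EXP_LIM out) := by unfold Spec_lin_comb; infer_instance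

-- ===== CLAIM (what is proved, stated in full; the proofs are below) =====
def Claim_equal_lin_comb : Prop := ∀ (prog : List (List Int)) (EXP_LIM : Int), Dom_lin_comb prog EXP_LIM → Pre_lin_comb prog EXP_LIM → Spec_lin_comb prog EXP_LIM (lin_comb prog EXP_LIM)

-- ===== LEMMAS AND PROOFS =====

def pvRangeOf (b : Int × Int) : List Int := PySem.List.pyRange b.1 (b.2 + 1) 1

theorem pvDot_nil (cs : List Int) : pvDot [] cs = 0 := by simp [pvDot]

theorem pvDot_nil_right (s : List Int) : pvDot s [] = 0 := by simp [pvDot]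

theorem pvDot_cons (v : Int) (s cs : List Int) :
    pvDot (v :: s) cs = cs.headD 0 * v + pvDot s cs.tail := by
  cases cs with
  | nil => simp [pvDot]
  | cons c cs' => simp [pvDot, List.zipWith]; ring

theorem pvFind?_flatMap {α β : Type} (f : α → List β) (p : β → Bool) (xs : List α) :
    ((xs.flatMap f).find? p) = xs.findSome? (fun x => (f x).find? p) := by
  induction xs with
  | nil => rfl
  | cons x xs ih =>
    simp only [List.flatMap_cons, List.find?_append, List.findSome?_cons, ih]
    cases h : (f x).find? p <;> simp

theorem pvFind?_congr {α : Type} (p q : α → Bool) (l : List α)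
    (h : ∀ x ∈ l, p x = q x) : l.find? p = l.find? q := by
  induction l with
  | nil => rfl
  | cons x xs ih =>
    simp only [List.find?_cons, h x (by simp)]
    cases hq : q x with
    | true => rfl
    | false => exact ih (fun y hy => h y (by simp [hy]))

theorem pvCart_length : ∀ (ls : List (List Int)) (s : List Int), s ∈ pvCart ls → s.length = ls.length := by
  intro ls
  induction ls with
  | nil => intro s hs; simp [pvCart] at hs; simp [hs]
  | cons xs rest ih =>
    intro s hs
    simp only [pvCart, List.mem_flatMap, List.mem_map] at hs
    obtain ⟨x, _, s', hs', rfl⟩ := hs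
    simp [ih s' hs']

theorem pvDot_le_maxContrib : ∀ (bounds : List (Int × Int)) (cs : List Int) (s : List Int),
    s ∈ pvCart (bounds.map pvRangeOf) → pvDot s cs ≤ pvMaxContrib bounds cs := by
  intro bounds
  induction bounds with
  | nil =>
    intro cs s hs
    simp [pvCart] at hs
    simp [hs, pvDot, pvMaxContrib]
  | cons b rest ih =>
    intro cs s hs
    obtain ⟨lo, hi⟩ := b
    simp only [List.map_cons, pvCart, List.mem_flatMap, List.mem_map] at hs
    obtain ⟨v, hv, s', hs', rfl⟩ := hs
    rw [pvRangeOf] at hv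
    rw [PySem.List.mem_pyRange_one] at hv
    rw [pvDot_cons]
    cases cs with
    | nil => simp [pvDot_nil_right, pvMaxContrib]
    | cons c cs' =>
      have hrest : pvDot s' cs' ≤ pvMaxContrib rest cs' := ih cs' s' hs'
      simp only [List.headD_cons, List.tail_cons, pvMaxContrib, List.zip_cons_cons,
        List.map_cons, List.sum_cons]
      have hterm : c * v ≤ (if 0 ≤ c then c * hi else c * lo) := by
        split_ifs with hc
        · exact mul_le_mul_of_nonneg_left (by omega) hc
        · exact mul_le_mul_of_nonpos_left (by omega) (by omega)
      calc c * v + pvDot s' cs' ≤ (if 0 ≤ c then c * hi else c * lo) + pvMaxContrib rest cs' := by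
            exact add_le_add hterm hrest
      

theorem pvDfs_eq : ∀ (bounds : List (Int × Int)) (state : List (Int × List Int)),
    pvDfs bounds state = (pvCart (bounds.map pvRangeOf)).find?
      (fun s => !state.any (fun pc => decide (pc.1 + pvDot s pc.2 < 0))) := by
  intro bounds
  induction bounds with
  | nil =>
    intro state
    rw [pvDfs]
    simp only [List.map_nil, pvCart, List.find?_cons, List.find?_nil]
    simp only [pvMaxContrib, List.zip_nil_left, List.map_nil, List.sum_nil, add_zero, pvDot_nil]
    cases h : state.any (fun pc => decide (pc.1 < 0)) <;> simp
  | cons b rest ih =>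
    intro state
    obtain ⟨lo, hi⟩ := b
    rw [pvDfs]
    by_cases hpr : state.any (fun pc => decide (pc.1 + pvMaxContrib ((lo, hi) :: rest) pc.2 < 0)) = true
    · rw [if_pos hpr]
      symm
      rw [List.find?_eq_none]
      intro s hs
      rw [List.any_eq_true] at hpr
      obtain ⟨pc, hmem, hlt⟩ := hpr
      have hle := pvDot_le_maxContrib ((lo, hi) :: rest) pc.2 s hs
      simp only [decide_eq_true_eq] at hlt
      simp only [Bool.not_eq_eq_eq_not, Bool.not_true]
      rw [Bool.not_eq_false, List.any_eq_true]
      exact ⟨pc, hmem, by simp; omega⟩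
    · rw [if_neg hpr]
      simp only [List.map_cons, pvCart]
      rw [pvFind?_flatMap]
      refine congrArg (fun f => List.findSome? f _) (funext fun v => ?_)
      rw [List.find?_map]
      rw [ih (state.map (fun pc => (pc.1 + pc.2.headD 0 * v, pc.2.tail)))]
      congr 1
      apply pvFind?_congr
      intro s _
      simp only [List.any_map, Function.comp_def, pvDot_cons, add_assoc]

theorem pvZipWith_take {α β γ : Type} (f : α → β → γ) :
    ∀ (c : List α) (row : List β) (n : Nat), c.length ≤ n →
      List.zipWith f c (row.take n) = List.zipWith f c row := by
  intro c
  induction c with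
  | nil => intro row n _; simp
  | cons x c' ih =>
    intro row n hn
    cases row with
    | nil => simp
    | cons r row' =>
      cases n with
      | zero => simp at hn
      | succ m => simp [List.take_succ_cons, ih row' m (by simpa using hn)]

-- ===== VERDICT (by name: the statement is the Claim_ definition above) =====
theorem lin_comb_spec : Claim_equal_lin_comb := by
  intro prog E _ hpre
  obtain ⟨hne, hlen, hrows⟩ := hpre
  unfold Spec_lin_comb lin_comb lin_comb_alt
  simp only []
  by_cases hg : (pvUsable prog (prog.headD []).length).getD 0 0 = 0
  · rw [if_pos hg, if_pos hg]
  · rw [if_neg hg, if_neg hg]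
    rw [pvDfs_eq]
    rw [show ((((1 : Int), E) :: (List.range' 1 ((prog.headD []).length - 1)).map (fun i =>
          if (pvUsable prog (prog.headD []).length).getD i 0 ≠ 0 then (-E, E) else (-E, 0))).map pvRangeOf)
        = PySem.List.pyRange 1 (E + 1) 1 :: (List.range' 1 ((prog.headD []).length - 1)).map (fun i =>
          if (pvUsable prog (prog.headD []).length).getD i 0 ≠ 0 then PySem.List.pyRange (-E) (E + 1) 1
          else PySem.List.pyRange (-E) 1 1) from ?_]
    · rw [pvFind?_congr _ _ _ ?_]
      · intro s hs
        have hslen : s.length = (prog.headD []).length := by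
          have := pvCart_length _ s hs
          simp only [List.length_cons, List.length_map, List.length_range'] at this
          omega
        have hdot : ∀ row : List Int, pvDot s (row.take (prog.headD []).length) = pvDot s row := by
          intro row
          unfold pvDot
          rw [pvZipWith_take _ s row _ (le_of_eq hslen)]
        simp only [List.any_map, Function.comp_def, zero_add, hdot]
    · simp only [List.map_cons, List.map_map]
      refine congrArg₂ _ rfl ?_
      apply List.map_congr_left
      intro i _
      simp only [Function.comp_def, pvRangeOf]
      split_ifs <;> norm_num
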